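-- pv_equiv track=rewrite | github.com/Cheol-H-Jeong/eodinga | eodinga/query/dsl.py | _regex_delimiters
-- ===== SOURCE A (Python) =====
-- def _regex_delimiters(value: str) -> list[int]:
--     delimiters: list[int] = []
--     backslashes = 0
--     for index, char in enumerate(value):
--         if char == "\\":
--             backslashes += 1
--             continue
--         if char == "/" and backslashes % 2 == 0:
--             delimiters.append(index)
--         backslashes = 0
--     return delimiters
-- ===== SOURCE B (Python) =====
-- def _trailing_backslashes(prefix: str) -> int:
--     n = 0
--     for ch in reversed(prefix):
--         if ch != "\\":
--             break
--         n += 1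
--     return n
--
--
-- def _regex_delimiters(value: str) -> list[int]:
--     return [i for i, c in enumerate(value)
--             if c == "/" and _trailing_backslashes(value[:i]) % 2 == 0]
-- ===== Notes on version B (the rewrite author's own statement) =====
-- stated objective: alternative
-- what changed: Replaces A's forward state machine (a running backslash counter reset on each non-backslash) with a declarative per-slash check: a comprehension over enumerate that, for each slash character, counts the trailing backslash run of the preceding prefix and keeps the index when that run is even.
import Mathlib
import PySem

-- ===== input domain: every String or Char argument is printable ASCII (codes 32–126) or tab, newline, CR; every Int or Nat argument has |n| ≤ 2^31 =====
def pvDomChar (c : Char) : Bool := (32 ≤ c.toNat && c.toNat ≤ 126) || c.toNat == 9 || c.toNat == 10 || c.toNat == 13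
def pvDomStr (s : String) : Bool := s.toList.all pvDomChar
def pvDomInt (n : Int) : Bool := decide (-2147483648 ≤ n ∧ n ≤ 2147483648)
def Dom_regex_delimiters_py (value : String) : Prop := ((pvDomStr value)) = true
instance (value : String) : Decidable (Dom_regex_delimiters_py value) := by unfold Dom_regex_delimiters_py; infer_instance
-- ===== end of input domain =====

-- B replaces A's forward escape-counting state machine by a per-slash backward scan of the
-- trailing backslash run (objective: alternative decomposition, same value everywhere).

-- ===== PORT A =====
-- forward fold over enumerate(value): state = (found delimiters, current backslash run)
def regex_delimiters_py (value : String) : List Int :=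
  (List.foldl
    (fun (st : List Int × Int) (p : Int × Char) =>
      if p.2 == '\\' then (st.1, st.2 + 1)
      else if p.2 == '/' && PySem.Int.mod st.2 2 == 0 then (st.1 ++ [p.1], 0)
      else (st.1, 0))
    ([], 0) (PySem.List.enumerate value.toList)).1

-- ===== PORT B =====
-- length of the trailing run of backslashes of a prefix (B's _trailing_backslashes)
def pvTrailingBackslashes (pre : List Char) : Nat :=
  (pre.reverse.takeWhile (fun c => c == '\\')).length

def regex_delimiters_py_alt (value : String) : List Int :=
  (PySem.List.enumerate value.toList).filterMap (fun p =>
    if p.2 == '/' && pvTrailingBackslashes (PySem.List.slice value.toList none (some p.1)) % 2 == 0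
    then some p.1 else none)

-- ===== PRECONDITION & SPEC =====
def Spec_regex_delimiters_py (value : String) (out : List Int) : Prop := out = regex_delimiters_py_alt value
instance (value : String) (out : List Int) : Decidable (Spec_regex_delimiters_py value out) := by unfold Spec_regex_delimiters_py; infer_instance

-- ===== CLAIM (what is proved, stated in full; the proofs are below) =====
def Claim_equal_regex_delimiters_py : Prop := ∀ (value : String), Dom_regex_delimiters_py value → Spec_regex_delimiters_py value (regex_delimiters_py value)

-- ===== LEMMAS AND PROOFS =====

theorem pvTrail_bs (pre : List Char) :
    pvTrailingBackslashes (pre ++ ['\\']) = pvTrailingBackslashes pre + 1 := by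
  simp [pvTrailingBackslashes]

theorem pvTrail_other (pre : List Char) (c : Char) (h : ¬ (c == '\\') = true) :
    pvTrailingBackslashes (pre ++ [c]) = 0 := by
  simp [pvTrailingBackslashes, h]

theorem pvSlice_prefix (pre rest : List Char) :
    PySem.List.slice (pre ++ rest) none (some (pre.length : Int)) = pre := by
  rw [PySem.List.slice_to _ (by positivity)]
  simp

theorem pvLoop (rest pre : List Char) (acc : List Int) :
    (List.foldl
      (fun (st : List Int × Int) (p : Int × Char) =>
        if p.2 == '\\' then (st.1, st.2 + 1)
        else if p.2 == '/' && PySem.Int.mod st.2 2 == 0 then (st.1 ++ [p.1], 0)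
        else (st.1, 0))
      (acc, (pvTrailingBackslashes pre : Int)) (PySem.List.enumerate rest (pre.length : Int))).1
    = acc ++ (PySem.List.enumerate rest (pre.length : Int)).filterMap (fun p =>
        if p.2 == '/' && pvTrailingBackslashes (PySem.List.slice (pre ++ rest) none (some p.1)) % 2 == 0
        then some p.1 else none) := by
  induction rest generalizing pre acc with
  | nil => simp [PySem.List.enumerate]
  | cons c rest ih =>
    rw [PySem.List.enumerate_cons]
    simp only [List.foldl_cons, List.filterMap_cons]
    by_cases hbs : (c == '\\') = true
    · have h1 : ((pvTrailingBackslashes pre : Int) + 1) = (pvTrailingBackslashes (pre ++ ['\\']) : Int) := by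
        rw [pvTrail_bs]; push_cast; ring
      have h2 : ((pre.length : Int) + 1) = (((pre ++ ['\\']).length : Nat) : Int) := by
        simp
      have hc : c = '\\' := by simpa using hbs
      subst hc
      rw [if_pos hbs]
      simp only [h1, h2]
      rw [ih (pre ++ ['\\']) acc]
      simp
    · rw [if_neg hbs]
      have hslice : PySem.List.slice (pre ++ c :: rest) none (some ((pre.length : Nat) : Int)) = pre := by
        exact pvSlice_prefix pre (c :: rest)
      have hpar : (PySem.Int.mod (pvTrailingBackslashes pre : Int) 2 == 0)
          = (pvTrailingBackslashes pre % 2 == 0) := by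
        have : PySem.Int.mod ((pvTrailingBackslashes pre : Nat) : Int) ((2 : Nat) : Int)
            = ((pvTrailingBackslashes pre % 2 : Nat) : Int) := PySem.Int.mod_natCast _ _
        simp at this
        simp
        omega
      have h2 : ((pre.length : Int) + 1) = (((pre ++ [c]).length : Nat) : Int) := by simp
      have h0 : (0 : Int) = (pvTrailingBackslashes (pre ++ [c]) : Int) := by
        rw [pvTrail_other pre c hbs]; simp
      by_cases hsl : (c == '/') = true
      · simp only [hsl, Bool.true_and, hslice, hpar]
        by_cases hpar2 : (pvTrailingBackslashes pre % 2 == 0) = true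
        · rw [if_pos hpar2, if_pos hpar2]
          have hih := ih (pre ++ [c]) (acc ++ [(pre.length : Int)])
          rw [← h0] at hih
          rw [h2, hih]
          simp [List.append_assoc]
        · rw [if_neg hpar2, if_neg hpar2]
          have hih := ih (pre ++ [c]) acc
          rw [← h0] at hih
          rw [h2, hih]
          simp [List.append_assoc]
      · simp only [hsl, Bool.false_and, if_neg (by simp : ¬ (false = true))]
        have hih := ih (pre ++ [c]) acc
        rw [← h0] at hih
        rw [h2, hih]
        simp [List.append_assoc]

-- ===== VERDICT (by name: the statement is the Claim_ definition above) =====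
theorem regex_delimiters_py_spec : Claim_equal_regex_delimiters_py := by
  intro value _
  unfold Spec_regex_delimiters_py regex_delimiters_py regex_delimiters_py_alt
  have := pvLoop value.toList [] []
  simpa [pvTrailingBackslashes] using this
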